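-- pv_equiv track=rewrite | github.com/Zhang-Xinyao/BMI3 | data_prepare.py | get_members
-- ===== SOURCE A (Python) =====
-- clusters={"cluster1":["HLhipCyc2","HLaseSto2","HLhipLar2"],
--           "cluster2":["HLrhiAff2","HLrhiSin3"],
--           "cluster3":["HLrhiSed2","HLrhiLuc4","HLrhiTri2"],
--           "cluster4":["HLrhiFer5"],
--           "cluster5":["HLpipKuh2","HLmyoMyo6"],
--           "cluster6":["HLmolMol2"],
--           "cluster7":["HLphyDis3"],
--           "cluster8":["HLrouAeg4"],}
--
-- cluster_neighbors = {
--     "cluster1": [],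
--     "cluster2": ["cluster3", "cluster4"],
--     "cluster3": ["cluster2", "cluster4"],
--     "cluster4": ["cluster2", "cluster3"],
--     "cluster5": ["cluster6"],
--     "cluster6": ["cluster5"],
--     "cluster7": [],
--     "cluster8": []
-- }
--
-- def get_members(input_element):
--     neighbor_cluster=0
--     for cluster_name, elements in clusters.items():
--         if input_element in elements:
--             if len(elements) > 1:
--                 return [e for e in elements if e != input_element], neighbor_cluster
--             else:
--                 # if there is no other members in its own cluster, we will search its neighboring cluster
--                 neighbors = cluster_neighbors.get(cluster_name, [])
--                 members = []
--                 for neighbor in neighbors: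
--                     neighbor_cluster += 1
--                     members.extend(clusters.get(neighbor, []))
--                 return members,neighbor_cluster
--     return [], 0
-- ===== SOURCE B (Python) =====
-- clusters={"cluster1":["HLhipCyc2","HLaseSto2","HLhipLar2"],
--           "cluster2":["HLrhiAff2","HLrhiSin3"],
--           "cluster3":["HLrhiSed2","HLrhiLuc4","HLrhiTri2"],
--           "cluster4":["HLrhiFer5"],
--           "cluster5":["HLpipKuh2","HLmyoMyo6"],
--           "cluster6":["HLmolMol2"],
--           "cluster7":["HLphyDis3"],
--           "cluster8":["HLrouAeg4"],}
--
-- cluster_neighbors = {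
--     "cluster1": [],
--     "cluster2": ["cluster3", "cluster4"],
--     "cluster3": ["cluster2", "cluster4"],
--     "cluster4": ["cluster2", "cluster3"],
--     "cluster5": ["cluster6"],
--     "cluster6": ["cluster5"],
--     "cluster7": [],
--     "cluster8": []
-- }
--
-- # reverse index: element -> its cluster name, built once
-- member_index = {e: name for name, elems in clusters.items() for e in elems}
--
-- def get_members(input_element):
--     cluster_name = member_index.get(input_element)
--     if cluster_name is None:
--         return [], 0
--     elements = clusters[cluster_name]
--     if len(elements) > 1:
--         return [e for e in elements if e != input_element], 0
--     neighbors = cluster_neighbors.get(cluster_name, [])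
--     members = [m for n in neighbors for m in clusters.get(n, [])]
--     return members, len(neighbors)
-- ===== Notes on version B (the rewrite author's own statement) =====
-- stated objective: idiomatic
-- what changed: Replaces A's linear scan over clusters.items() with a module-level reverse index (element -> cluster name) built once, then a direct dict lookup; the neighbor accumulation loop with its running counter becomes a flat comprehension plus len(neighbors).
import Mathlib
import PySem

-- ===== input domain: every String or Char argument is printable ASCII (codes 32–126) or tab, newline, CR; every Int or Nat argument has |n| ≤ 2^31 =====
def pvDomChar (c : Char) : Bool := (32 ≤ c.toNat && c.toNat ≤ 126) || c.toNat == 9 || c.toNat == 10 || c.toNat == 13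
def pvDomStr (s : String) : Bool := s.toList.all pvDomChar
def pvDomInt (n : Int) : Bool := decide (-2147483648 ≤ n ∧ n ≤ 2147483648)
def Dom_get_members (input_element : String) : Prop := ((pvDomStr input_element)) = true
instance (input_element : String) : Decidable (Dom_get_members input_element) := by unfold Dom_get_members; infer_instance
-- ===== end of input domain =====

-- B replaces A's linear scan of the clusters dict by a module-level reverse index
-- (element -> cluster name) built once, then a direct lookup (objective: idiomatic).

-- ===== PORT A =====
def clustersA : PySem.Dict String (List String) := PySem.Dict.ofList
  [("cluster1", ["HLhipCyc2","HLaseSto2","HLhipLar2"]),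
   ("cluster2", ["HLrhiAff2","HLrhiSin3"]),
   ("cluster3", ["HLrhiSed2","HLrhiLuc4","HLrhiTri2"]),
   ("cluster4", ["HLrhiFer5"]),
   ("cluster5", ["HLpipKuh2","HLmyoMyo6"]),
   ("cluster6", ["HLmolMol2"]),
   ("cluster7", ["HLphyDis3"]),
   ("cluster8", ["HLrouAeg4"])]

def cluster_neighborsA : PySem.Dict String (List String) := PySem.Dict.ofList
  [("cluster1", []),
   ("cluster2", ["cluster3","cluster4"]),
   ("cluster3", ["cluster2","cluster4"]),
   ("cluster4", ["cluster2","cluster3"]),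
   ("cluster5", ["cluster6"]),
   ("cluster6", ["cluster5"]),
   ("cluster7", []),
   ("cluster8", [])]

-- A's for-loop over clusters.items() with the running neighbor_cluster counter
def get_members_loopA (input_element : String) : List (String × List String) → Int → List String × Int
  | [], _ => ([], 0)
  | (cluster_name, elements) :: rest, neighbor_cluster =>
    if input_element ∈ elements then
      if (elements.length : Int) > 1 then
        (elements.filter (fun e => e ≠ input_element), neighbor_cluster)
      else
        let neighbors := cluster_neighborsA.getD cluster_name []
        let (members, nc) := neighbors.foldl
          (fun (acc : List String × Int) neighbor =>
            (acc.1 ++ clustersA.getD neighbor [], acc.2 + 1))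
          (([] : List String), neighbor_cluster)
        (members, nc)
    else get_members_loopA input_element rest neighbor_cluster

def get_members (input_element : String) : List String × Int :=
  get_members_loopA input_element clustersA.items 0

-- ===== PORT B =====
-- reverse index: element -> its cluster name, built once from clustersA's items
def member_index : PySem.Dict String String :=
  clustersA.items.foldl
    (fun d p => p.2.foldl (fun d e => d.insert e p.1) d)
    PySem.Dict.empty

def get_members_alt (input_element : String) : List String × Int :=
  match member_index.get? input_element with
  | none => ([], 0)
  | some cluster_name =>
    let elements := clustersA.getD cluster_name []
    if (elements.length : Int) > 1 then
      (elements.filter (fun e => e ≠ input_element), 0)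
    else
      let neighbors := cluster_neighborsA.getD cluster_name []
      (neighbors.flatMap (fun n => clustersA.getD n []), (neighbors.length : Int))

-- ===== PRECONDITION & SPEC =====
def Spec_get_members (input_element : String) (out : List String × Int) : Prop := out = get_members_alt input_element
instance (input_element : String) (out : List String × Int) : Decidable (Spec_get_members input_element out) := by unfold Spec_get_members; infer_instance

-- ===== CLAIM (what is proved, stated in full; the proofs are below) =====
def Claim_equal_get_members : Prop := ∀ (input_element : String), Dom_get_members input_element → Spec_get_members input_element (get_members input_element)

-- ===== LEMMAS AND PROOFS =====

-- ===== VERDICT (by name: the statement is the Claim_ definition above) =====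
theorem get_members_spec : Claim_equal_get_members := by
  intro s _
  unfold Spec_get_members
  by_cases h1 : s = "HLhipCyc2"; · subst h1; decide
  by_cases h2 : s = "HLaseSto2"; · subst h2; decide
  by_cases h3 : s = "HLhipLar2"; · subst h3; decide
  by_cases h4 : s = "HLrhiAff2"; · subst h4; decide
  by_cases h5 : s = "HLrhiSin3"; · subst h5; decide
  by_cases h6 : s = "HLrhiSed2"; · subst h6; decide
  by_cases h7 : s = "HLrhiLuc4"; · subst h7; decide
  by_cases h8 : s = "HLrhiTri2"; · subst h8; decide
  by_cases h9 : s = "HLrhiFer5"; · subst h9; decide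
  by_cases h10 : s = "HLpipKuh2"; · subst h10; decide
  by_cases h11 : s = "HLmyoMyo6"; · subst h11; decide
  by_cases h12 : s = "HLmolMol2"; · subst h12; decide
  by_cases h13 : s = "HLphyDis3"; · subst h13; decide
  by_cases h14 : s = "HLrouAeg4"; · subst h14; decide
  have g1 : ¬ ("HLhipCyc2" = s) := fun h => h1 h.symm
  have g2 : ¬ ("HLaseSto2" = s) := fun h => h2 h.symm
  have g3 : ¬ ("HLhipLar2" = s) := fun h => h3 h.symm
  have g4 : ¬ ("HLrhiAff2" = s) := fun h => h4 h.symm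
  have g5 : ¬ ("HLrhiSin3" = s) := fun h => h5 h.symm
  have g6 : ¬ ("HLrhiSed2" = s) := fun h => h6 h.symm
  have g7 : ¬ ("HLrhiLuc4" = s) := fun h => h7 h.symm
  have g8 : ¬ ("HLrhiTri2" = s) := fun h => h8 h.symm
  have g9 : ¬ ("HLrhiFer5" = s) := fun h => h9 h.symm
  have g10 : ¬ ("HLpipKuh2" = s) := fun h => h10 h.symm
  have g11 : ¬ ("HLmyoMyo6" = s) := fun h => h11 h.symm
  have g12 : ¬ ("HLmolMol2" = s) := fun h => h12 h.symm
  have g13 : ¬ ("HLphyDis3" = s) := fun h => h13 h.symm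
  have g14 : ¬ ("HLrouAeg4" = s) := fun h => h14 h.symm
  simp [get_members, get_members_alt, get_members_loopA, member_index, clustersA,
    PySem.Dict.ofList, PySem.Dict.update, PySem.Dict.empty,
    PySem.Dict.insert, PySem.Dict.get?, PySem.Dict.contains,
    h1, h2, h3, h4, h5, h6, h7, h8, h9, h10, h11, h12, h13, h14, g1, g2, g3, g4, g5, g6, g7, g8, g9, g10, g11, g12, g13, g14]
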